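-- pv_equiv track=rewrite | github.com/GABallena/Hunting | UCLA/Exercises2.py | calculate_minimum_edges
-- ===== SOURCE A (Python) =====
-- from collections import defaultdict
-- from collections import defaultdict
-- from collections import defaultdict
-- from collections import defaultdict
-- from collections import defaultdict
-- from collections import defaultdict, deque
-- from collections import defaultdict
-- from collections import defaultdict, deque
-- from collections import defaultdict, deque
-- from collections import defaultdict
-- from collections import defaultdict
--
-- def calculate_minimum_edges(adj_list):
--     # Step 1: Calculate in-degree and out-degree
--     out_degree = defaultdict(int)
--     in_degree = defaultdict(int)
--
--     for node, neighbors in adj_list.items():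
--         out_degree[node] += len(neighbors)
--         for neighbor in neighbors:
--             in_degree[neighbor] += 1
--
--     # Step 2: Calculate imbalance for each node
--     imbalance = defaultdict(int)
--     for node in set(out_degree.keys()).union(in_degree.keys()):
--         imbalance[node] = out_degree[node] - in_degree[node]
--
--     # Step 3: Count total positive imbalance
--     total_positive_imbalance = sum(max(0, imbalance[node]) for node in imbalance)
--
--     return total_positive_imbalance
-- ===== SOURCE B (Python) =====
-- def calculate_minimum_edges(adj_list):
--     # Multiset cancellation: collect every edge's source endpoint and target
--     # endpoint, cancel each target against one matching source, and the
--     # number of uncancelled sources is the answer.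
--     sources = []
--     targets = []
--     for node, neighbors in adj_list.items():
--         sources.extend([node] * len(neighbors))
--         targets.extend(neighbors)
--     for t in targets:
--         if t in sources:
--             sources.remove(t)
--     return len(sources)
-- ===== Notes on version B (the rewrite author's own statement) =====
-- stated objective: alternative
-- what changed: B replaces the degree dictionaries and per-node imbalance sum by multiset cancellation on flat edge-endpoint lists: it collects every edge's source and target endpoint, cancels each target against one matching source occurrence with list.remove, and returns the number of uncancelled sources; it trades the dict passes for list scans (O(E^2) worst case).
import Mathlib
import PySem

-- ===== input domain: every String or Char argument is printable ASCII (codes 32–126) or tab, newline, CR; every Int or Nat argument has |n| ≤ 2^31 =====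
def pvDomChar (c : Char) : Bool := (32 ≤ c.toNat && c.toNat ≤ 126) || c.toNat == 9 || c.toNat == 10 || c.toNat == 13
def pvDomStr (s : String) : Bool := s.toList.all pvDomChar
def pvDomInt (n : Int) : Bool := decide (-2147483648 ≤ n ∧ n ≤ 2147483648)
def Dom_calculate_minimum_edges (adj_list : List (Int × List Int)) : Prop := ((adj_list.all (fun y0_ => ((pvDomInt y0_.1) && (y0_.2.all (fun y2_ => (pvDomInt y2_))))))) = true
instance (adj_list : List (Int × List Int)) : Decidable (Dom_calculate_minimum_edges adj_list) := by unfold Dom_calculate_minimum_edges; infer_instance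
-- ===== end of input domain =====

-- B replaces A's degree dictionaries and per-node imbalance sum by multiset
-- cancellation on flat edge-endpoint lists (objective: alternative algorithm).

-- ===== PORT A =====
def calculate_minimum_edges (adj_list : List (Int × List Int)) : Int :=
  -- Step 1: out_degree / in_degree in one loop over adj_list.items()
  let deg := adj_list.foldl
    (fun (s : PySem.Dict Int Int × PySem.Dict Int Int) p =>
      (s.1.modify p.1 0 (· + (p.2.length : Int)),
       p.2.foldl (fun d n => d.modify n 0 (· + 1)) s.2))
    (PySem.Dict.empty, PySem.Dict.empty)
  -- Step 2: imbalance over the union of the key sets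
  let nodes := PySem.Set.union (PySem.Set.ofList deg.1.keys) deg.2.keys
  let imbalance := nodes.foldl
    (fun d node => d.insert node (deg.1.getD node 0 - deg.2.getD node 0))
    PySem.Dict.empty
  -- Step 3: total positive imbalance
  imbalance.keys.foldl (fun acc node => acc + max 0 (imbalance.getD node 0)) 0

-- ===== PORT B =====
def calculate_minimum_edges_alt (adj_list : List (Int × List Int)) : Int :=
  -- sources.extend([node] * len(neighbors)); targets.extend(neighbors)
  let st := adj_list.foldl
    (fun (st : List Int × List Int) p =>
      (st.1 ++ List.replicate p.2.length p.1, st.2 ++ p.2))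
    ([], [])
  -- for t in targets: if t in sources: sources.remove(t)
  -- (list.remove deletes the first occurrence; guarded by the membership test)
  let sources := st.2.foldl
    (fun s t => if t ∈ s then (PySem.List.remove? s t).getD s else s) st.1
  (sources.length : Int)

-- ===== PRECONDITION & SPEC =====
def Spec_calculate_minimum_edges (adj_list : List (Int × List Int)) (out : Int) : Prop := out = calculate_minimum_edges_alt adj_list
instance (adj_list : List (Int × List Int)) (out : Int) : Decidable (Spec_calculate_minimum_edges adj_list out) := by unfold Spec_calculate_minimum_edges; infer_instance

-- ===== CLAIM (what is proved, stated in full; the proofs are below) =====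
def Claim_equal_calculate_minimum_edges : Prop := ∀ (adj_list : List (Int × List Int)), Dom_calculate_minimum_edges adj_list → Spec_calculate_minimum_edges adj_list (calculate_minimum_edges adj_list)

-- ===== LEMMAS AND PROOFS =====

-- out-degree of k contributed by l, and in-degree of k contributed by l
def pvOutW (l : List (Int × List Int)) (k : Int) : Int :=
  (l.map (fun p => if p.1 = k then (p.2.length : Int) else 0)).sum
def pvInW (l : List (Int × List Int)) (k : Int) : Int :=
  ((l.flatMap (·.2)).count k : Int)
-- B's two endpoint lists
def pvSrc (l : List (Int × List Int)) : List Int :=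
  l.flatMap (fun p => List.replicate p.2.length p.1)
def pvTgt (l : List (Int × List Int)) : List Int := l.flatMap (·.2)

-- the pair fold in A is the pair of the two component folds
theorem pv_pairfold (l : List (Int × List Int)) (d1 d2 : PySem.Dict Int Int) :
    l.foldl
      (fun (s : PySem.Dict Int Int × PySem.Dict Int Int) p =>
        (s.1.modify p.1 0 (· + (p.2.length : Int)),
         p.2.foldl (fun d n => d.modify n 0 (· + 1)) s.2)) (d1, d2)
    = (l.foldl (fun d p => d.modify p.1 0 (· + (p.2.length : Int))) d1,
       l.foldl (fun d p => p.2.foldl (fun d n => d.modify n 0 (· + 1)) d) d2) := by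
  induction l generalizing d1 d2 with
  | nil => rfl
  | cons p l ih => simp [List.foldl, ih]

theorem pv_out_getD (l : List (Int × List Int)) (d : PySem.Dict Int Int) (k : Int) :
    (l.foldl (fun d p => d.modify p.1 0 (· + (p.2.length : Int))) d).getD k 0
    = d.getD k 0 + pvOutW l k := by
  induction l generalizing d with
  | nil => simp [pvOutW]
  | cons p l ih =>
    rw [List.foldl_cons, ih, PySem.Dict.getD_modify]
    simp only [pvOutW, List.map_cons, List.sum_cons]
    rcases eq_or_ne k p.1 with h | h
    · subst h; rw [if_pos rfl, if_pos rfl]; ring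
    · rw [if_neg h, if_neg (Ne.symm h)]; ring

theorem pv_in_getD (l : List (Int × List Int)) (d : PySem.Dict Int Int) (k : Int) :
    (l.foldl (fun d p => p.2.foldl (fun d n => d.modify n 0 (· + 1)) d) d).getD k 0
    = d.getD k 0 + pvInW l k := by
  induction l generalizing d with
  | nil => simp [pvInW]
  | cons p l ih =>
    rw [List.foldl_cons, ih, PySem.Dict.getD_foldl_modify_add_one]
    simp only [pvInW, List.flatMap_cons, List.count_append]
    push_cast; ring

-- keys of the folds
theorem pv_in_keys (l : List (Int × List Int)) (d : PySem.Dict Int Int) :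
    (l.foldl (fun d p => p.2.foldl (fun d n => d.modify n 0 (· + 1)) d) d).keys
    = PySem.Set.update d.keys (l.flatMap (·.2)) := by
  induction l generalizing d with
  | nil => simp [PySem.Set.update]
  | cons p l ih =>
    rw [List.foldl_cons, ih, PySem.Dict.keys_foldl_modify, List.flatMap_cons,
      PySem.Set.update_append]

theorem pv_keys_insert_add (d : PySem.Dict Int Int) (k : Int) (v : Int) :
    (d.insert k v).keys = PySem.Set.add d.keys k := by
  by_cases h : d.contains k = true
  · rw [PySem.Dict.keys_insert_of_contains _ _ h,
      PySem.Set.add_of_mem ((PySem.Dict.contains_iff_mem_keys _ _).mp h)]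
  · have h' : d.contains k = false := by simpa using h
    rw [PySem.Dict.keys_insert_of_not_contains _ _ h',
      PySem.Set.add_of_not_mem (fun hm => by
        simp [(PySem.Dict.contains_iff_mem_keys _ _).mpr hm] at h')]

theorem pv_out_keys (l : List (Int × List Int)) (d : PySem.Dict Int Int) :
    (l.foldl (fun d p => d.modify p.1 0 (· + (p.2.length : Int))) d).keys
    = PySem.Set.update d.keys (l.map (·.1)) := by
  induction l generalizing d with
  | nil => simp [PySem.Set.update]
  | cons p l ih =>
    rw [List.foldl_cons, ih, PySem.Dict.keys_modify, pv_keys_insert_add, List.map_cons,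
      PySem.Set.update_cons]

-- the insert fold building `imbalance`: lookup of a key
theorem pv_imb_getD (u : List Int) (F : Int → Int) (d : PySem.Dict Int Int) (k : Int) :
    (u.foldl (fun d node => d.insert node (F node)) d).getD k 0
    = if k ∈ u then F k else d.getD k 0 := by
  induction u generalizing d with
  | nil => simp
  | cons x u ih =>
    rw [List.foldl_cons, ih, PySem.Dict.getD_insert]
    simp only [List.mem_cons]
    split_ifs with h1 h2 <;> simp_all

theorem pv_foldl_max (u : List Int) (D : PySem.Dict Int Int) (g : Int → Int) (a : Int)
    (h : ∀ x ∈ u, D.getD x 0 = g x) :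
    u.foldl (fun acc node => acc + max 0 (D.getD node 0)) a
    = a + (u.map (fun x => max 0 (g x))).sum := by
  induction u generalizing a with
  | nil => simp
  | cons x u ih =>
    rw [List.foldl_cons, ih _ (fun y hy => h y (List.mem_cons_of_mem _ hy)),
      h x List.mem_cons_self, List.map_cons, List.sum_cons]
    ring

-- ---- B side ----

-- B's pair fold is the pair of the two flatMaps
theorem pv_b_pairfold (l : List (Int × List Int)) (s1 s2 : List Int) :
    l.foldl
      (fun (st : List Int × List Int) p =>
        (st.1 ++ List.replicate p.2.length p.1, st.2 ++ p.2)) (s1, s2)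
    = (s1 ++ pvSrc l, s2 ++ pvTgt l) := by
  induction l generalizing s1 s2 with
  | nil => simp [pvSrc, pvTgt]
  | cons p l ih => simp [List.foldl, ih, pvSrc, pvTgt]

-- one removal step: count goes down by the matching indicator (truncated)
theorem pv_step_count (s : List Int) (t x : Int) :
    ((if t ∈ s then (PySem.List.remove? s t).getD s else s).count x)
    = s.count x - if t = x then 1 else 0 := by
  by_cases ht : t ∈ s
  · rw [if_pos ht, PySem.List.remove?_eq_some_erase _ _ ht, Option.getD_some,
      List.count_erase]
    rcases eq_or_ne t x with h | h
    · subst h; simp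
    · simp [h]
  · rw [if_neg ht]
    rcases eq_or_ne t x with h | h
    · subst h; simp [List.count_eq_zero_of_not_mem ht]
    · simp [h]

-- the removal loop: counts are the truncated multiset difference
theorem pv_rem_count (ts : List Int) (s : List Int) (x : Int) :
    ((ts.foldl (fun s t => if t ∈ s then (PySem.List.remove? s t).getD s else s) s).count x)
    = s.count x - ts.count x := by
  induction ts generalizing s with
  | nil => simp
  | cons t ts ih =>
    rw [List.foldl_cons, ih, pv_step_count, List.count_cons]
    rcases eq_or_ne t x with h | h
    · subst h; simp; omega
    · simp [h]

-- the removal loop never adds elements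
theorem pv_rem_subset (ts : List Int) (s : List Int) (x : Int)
    (hx : x ∈ ts.foldl (fun s t => if t ∈ s then (PySem.List.remove? s t).getD s else s) s) :
    x ∈ s := by
  have h := pv_rem_count ts s x
  have h1 : 1 ≤ (ts.foldl (fun s t => if t ∈ s then (PySem.List.remove? s t).getD s else s) s).count x :=
    List.one_le_count_iff.mpr hx
  exact List.one_le_count_iff.mp (by omega)

theorem pv_src_count (l : List (Int × List Int)) (x : Int) :
    ((pvSrc l).count x : Int) = pvOutW l x := by
  induction l with
  | nil => simp [pvSrc, pvOutW]
  | cons p l ih =>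
    simp only [pvSrc, pvOutW, List.flatMap_cons, List.count_append, List.map_cons,
      List.sum_cons] at *
    rw [List.count_replicate]
    rcases eq_or_ne p.1 x with h | h
    · rw [if_pos (by simp [h]), if_pos h]; push_cast; omega
    · rw [if_neg (by simp [h]), if_neg h]; push_cast; omega

-- sum over a nodup list of pointwise-added functions splits
theorem pv_map_sum_add (u : List Int) (f g : Int → Int) :
    (u.map (fun x => f x + g x)).sum = (u.map f).sum + (u.map g).sum := by
  induction u with
  | nil => simp
  | cons a u ih => simp only [List.map_cons, List.sum_cons, ih]; ring

-- sum of a membership indicator over a nodup list containing a is 1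
theorem pv_indicator_sum (u : List Int) (a : Int) (hu : u.Nodup) (ha : a ∈ u) :
    (u.map (fun x => if x = a then (1 : Int) else 0)).sum = 1 := by
  induction u with
  | nil => cases ha
  | cons b u ih =>
    rw [List.map_cons, List.sum_cons]
    by_cases h : b = a
    · subst h
      have hz : ∀ x ∈ u, (if x = b then (1 : Int) else 0) = 0 := by
        intro x hx
        rw [if_neg]; rintro rfl; exact (List.nodup_cons.mp hu).1 hx
      rw [if_pos rfl, List.sum_eq_zero (by simpa using hz)]; ring
    · rw [if_neg h,
        ih (List.nodup_cons.mp hu).2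
          ((List.mem_cons.mp ha).resolve_left (Ne.symm h)), zero_add]

-- length of a list = sum of its counts over any nodup superset of its elements
theorem pv_length_eq_sum_count (l u : List Int) (hu : u.Nodup)
    (hl : ∀ x ∈ l, x ∈ u) :
    (u.map (fun x => (l.count x : Int))).sum = (l.length : Int) := by
  induction l with
  | nil => simp
  | cons a l ih =>
    have hcount : ∀ x : Int, (((a :: l).count x : Int))
        = (l.count x : Int) + (if x = a then 1 else 0) := by
      intro x
      rw [List.count_cons]
      rcases eq_or_ne x a with h | h
      · subst h; simp
      · have h' : ¬ a = x := fun he => h he.symm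
        simp [h, h']
    calc (u.map (fun x => ((a :: l).count x : Int))).sum
        = (u.map (fun x => (l.count x : Int) + (if x = a then 1 else 0))).sum := by
          rw [List.map_congr_left (fun x _ => hcount x)]
      _ = (u.map (fun x => (l.count x : Int))).sum
            + (u.map (fun x => if x = a then (1 : Int) else 0)).sum :=
          pv_map_sum_add u _ _
      _ = (l.length : Int) + 1 := by
          rw [ih (fun x hx => hl x (List.mem_cons_of_mem _ hx)),
            pv_indicator_sum u a hu (hl a List.mem_cons_self)]
      _ = (((a :: l).length : Nat) : Int) := by simp

-- cast of a truncated Nat subtraction is the clamped Int subtraction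
theorem pv_cast_sub (a b : Nat) : ((a - b : Nat) : Int) = max 0 ((a : Int) - b) := by
  rcases le_total a b with h | h
  · rw [Nat.sub_eq_zero_of_le h, max_eq_left (by omega)]; simp
  · rw [max_eq_right (by omega)]; push_cast [h]; ring

-- ===== VERDICT (by name: the statement is the Claim_ definition above) =====
theorem calculate_minimum_edges_spec : Claim_equal_calculate_minimum_edges := by
  intro l _
  unfold Spec_calculate_minimum_edges calculate_minimum_edges calculate_minimum_edges_alt
  simp only [pv_pairfold, pv_b_pairfold, List.nil_append]
  rw [pv_out_keys, pv_in_keys, PySem.Dict.keys_empty, PySem.Set.update_nil_left,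
    PySem.Set.update_nil_left]
  rw [PySem.Dict.keys_foldl_insert, PySem.Dict.keys_empty, PySem.Set.update_nil_left,
    PySem.Set.ofList_eq_self_of_nodup _ (PySem.Set.nodup_union _ _ (PySem.Set.nodup_ofList _))]
  rw [pv_foldl_max _ _ (fun node => pvOutW l node - pvInW l node) _
    (by
      intro x hx
      rw [pv_imb_getD, if_pos hx, pv_out_getD, pv_in_getD, PySem.Dict.getD_empty]
      simp)]
  rw [zero_add]
  have hmem : ∀ x ∈ (pvTgt l).foldl
      (fun s t => if t ∈ s then (PySem.List.remove? s t).getD s else s) (pvSrc l),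
      x ∈ PySem.Set.union
        (PySem.Set.ofList (PySem.Set.ofList (l.map (·.1))))
        (PySem.Set.ofList (l.flatMap (·.2))) := by
    intro x hx
    have hs := pv_rem_subset _ _ _ hx
    simp only [pvSrc, List.mem_flatMap, List.mem_replicate] at hs
    obtain ⟨p, hp, -, rfl⟩ := hs
    rw [PySem.Set.mem_union, PySem.Set.mem_ofList, PySem.Set.mem_ofList]
    exact Or.inl (List.mem_map.mpr ⟨p, hp, rfl⟩)
  rw [← pv_length_eq_sum_count _ _
    (PySem.Set.nodup_union _ _ (PySem.Set.nodup_ofList _)) hmem]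
  congr 1
  apply List.map_congr_left
  intro x _
  rw [pv_rem_count, pv_cast_sub, ← pv_src_count]
  simp only [pvInW, pvTgt]
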